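-- pv_equiv track=rewrite | github.com/patrickarmengol/leetcode-exercises | 2027_min_moves_convert_string.py | easier_minimum_moves
-- ===== SOURCE A (Python) =====
-- def easier_minimum_moves(s):
--     moves = 0
--     i = 0
--     while i < len(s):
--         if s[i] == 'X':
--             moves += 1
--             i += 3
--         else:
--             i += 1
--     return moves
-- ===== SOURCE B (Python) =====
-- def easier_minimum_moves(s):
--     # dp over suffixes, computed right-to-left with a rolling window:
--     # d1, d2, d3 = dp[i+1], dp[i+2], dp[i+3]; dp[i] = 1+dp[i+3] if s[i]=='X' else dp[i+1]
--     d1 = d2 = d3 = 0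
--     for c in reversed(s):
--         cur = 1 + d3 if c == 'X' else d1
--         d1, d2, d3 = cur, d1, d2
--     return d1
-- ===== Notes on version B (the rewrite author's own statement) =====
-- stated objective: alternative
-- what changed: Replaced the forward pointer-jumping greedy scan by a right-to-left dynamic-programming pass over the suffixes, keeping only a rolling window of the three suffix dp values dp[i+1], dp[i+2], dp[i+3].
import Mathlib
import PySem

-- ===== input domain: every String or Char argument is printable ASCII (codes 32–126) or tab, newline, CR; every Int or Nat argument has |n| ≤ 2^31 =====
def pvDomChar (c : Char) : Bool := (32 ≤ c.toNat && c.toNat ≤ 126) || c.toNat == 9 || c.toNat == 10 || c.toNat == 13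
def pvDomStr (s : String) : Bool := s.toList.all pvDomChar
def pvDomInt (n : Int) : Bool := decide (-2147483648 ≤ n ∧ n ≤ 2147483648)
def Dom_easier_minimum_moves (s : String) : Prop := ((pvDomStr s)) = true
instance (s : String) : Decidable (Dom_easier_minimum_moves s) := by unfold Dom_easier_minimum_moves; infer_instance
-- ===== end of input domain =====

-- B replaces A's forward greedy pointer-jumping scan by a right-to-left suffix
-- dynamic-programming pass with a rolling window of three dp values (alternative, same cost).

-- ===== PORT A =====
-- A's while loop over index i: at an 'X' count a move and jump i by 3, else by 1;
-- rendered as recursion over the character list (i += 3 = skip current char plus two more).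
def pvLoopA : List Char → Int
  | [] => 0
  | c :: rest => if c = 'X' then 1 + pvLoopA (rest.drop 2) else pvLoopA rest
termination_by cs => cs.length
decreasing_by all_goals simp [List.length_drop]

def easier_minimum_moves (s : String) : Int := pvLoopA s.toList

-- ===== PORT B =====
-- loop body: cur = 1 + d3 if c == 'X' else d1; d1, d2, d3 = cur, d1, d2
def pvStepB (acc : Int × Int × Int) (c : Char) : Int × Int × Int :=
  ((if c = 'X' then 1 + acc.2.2 else acc.1), acc.1, acc.2.1)

-- for c in reversed(s): … ; return d1
def easier_minimum_moves_alt (s : String) : Int :=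
  (s.toList.reverse.foldl pvStepB (0, 0, 0)).1

-- ===== PRECONDITION & SPEC =====
def Spec_easier_minimum_moves (s : String) (out : Int) : Prop := out = easier_minimum_moves_alt s
instance (s : String) (out : Int) : Decidable (Spec_easier_minimum_moves s out) := by unfold Spec_easier_minimum_moves; infer_instance

-- ===== CLAIM (what is proved, stated in full; the proofs are below) =====
def Claim_equal_easier_minimum_moves : Prop := ∀ (s : String), Dom_easier_minimum_moves s → Spec_easier_minimum_moves s (easier_minimum_moves s)

-- ===== LEMMAS AND PROOFS =====

-- the backward fold carries exactly the dp values of the current suffix and the next two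
lemma pv_main (cs : List Char) :
    cs.reverse.foldl pvStepB (0, 0, 0)
      = (pvLoopA cs, pvLoopA (cs.drop 1), pvLoopA (cs.drop 2)) := by
  induction cs with
  | nil => simp [pvLoopA]
  | cons c rest ih =>
    rw [List.reverse_cons, List.foldl_append, ih]
    rcases rest with _ | ⟨a, _ | ⟨b, r⟩⟩ <;>
      simp [pvStepB, pvLoopA]

-- ===== VERDICT (by name: the statement is the Claim_ definition above) =====
theorem easier_minimum_moves_spec : Claim_equal_easier_minimum_moves := by
  intro s _
  unfold Spec_easier_minimum_moves easier_minimum_moves easier_minimum_moves_alt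
  rw [pv_main]
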